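-- pv_equiv track=rewrite | github.com/MichalDudekk/ASD | 91 - wrath - gniew.py | wrath
-- ===== SOURCE A (Python) =====
-- def wrath(L):
--     n = len(L)
--     alive = 0
--     death_pointer = n
--     for i in range(n-1,-1,-1):
--         if i < death_pointer:
--             alive += 1
--         death_pointer = min(death_pointer,i-L[i])
--     return alive
-- ===== SOURCE B (Python) =====
-- def wrath(L):
--     n = len(L)
--     diff = [0] * (n + 1)
--     for j, x in enumerate(L):
--         lo = max(0, j - x)
--         if lo < j:
--             diff[lo] += 1
--             diff[j] -= 1
--     alive = 0
--     cover = 0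
--     for d in diff[:n]:
--         cover += d
--         if cover == 0:
--             alive += 1
--     return alive
-- ===== Notes on version B (the rewrite author's own statement) =====
-- stated objective: alternative
-- what changed: B recasts the problem as interval coverage: each soldier j kills the index interval [max(0, j-L[j]), j-1], which B records in a difference array and then counts indices with zero coverage in a forward prefix-sum sweep, instead of A's backward sweep maintaining a running minimum death pointer.
import Mathlib
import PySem

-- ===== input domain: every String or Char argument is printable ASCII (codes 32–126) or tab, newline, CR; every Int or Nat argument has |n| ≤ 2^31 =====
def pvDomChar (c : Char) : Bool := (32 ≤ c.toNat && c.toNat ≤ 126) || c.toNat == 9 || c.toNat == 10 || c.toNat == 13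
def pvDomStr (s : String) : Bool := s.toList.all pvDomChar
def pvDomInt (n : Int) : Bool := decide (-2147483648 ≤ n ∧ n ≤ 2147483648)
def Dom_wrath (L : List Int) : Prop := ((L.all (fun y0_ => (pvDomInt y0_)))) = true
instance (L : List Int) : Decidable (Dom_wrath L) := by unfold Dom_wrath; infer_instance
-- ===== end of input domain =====

-- B replaces A's reverse suffix-minimum sweep by interval marking: each j kills the
-- index interval [max(0, j-L[j]), j-1]; B records the intervals in a difference array
-- and counts uncovered indices in a forward prefix-sum sweep (alternative algorithm, same O(n) cost).

-- ===== PORT A =====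
def wrath (L : List Int) : Int :=
  let n : Int := (L.length : Int)
  ((PySem.List.pyRange (n - 1) (-1) (-1)).foldl
    (fun (s : Int × Int) i =>
      (if i < s.2 then s.1 + 1 else s.1, min s.2 (i - PySem.List.pyGetD L i 0)))
    (0, n)).1

-- ===== PORT B =====
-- diff[lo] += 1 / diff[j] -= 1 ported with pySetD/pyGetD: exact, the indices are in range (0 ≤ lo < j ≤ n).
def wrath_alt (L : List Int) : Int :=
  let n : Int := (L.length : Int)
  let diff : List Int := (PySem.List.enumerate L).foldl
    (fun (D : List Int) p =>
      let lo : Int := max 0 (p.1 - p.2)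
      if lo < p.1 then
        let D1 := PySem.List.pySetD D lo (PySem.List.pyGetD D lo 0 + 1)
        PySem.List.pySetD D1 p.1 (PySem.List.pyGetD D1 p.1 0 - 1)
      else D)
    (List.replicate (L.length + 1) 0)
  ((PySem.List.slice diff none (some n)).foldl
    (fun (s : Int × Int) d =>
      (if s.2 + d = 0 then s.1 + 1 else s.1, s.2 + d))
    (0, 0)).1

-- ===== PRECONDITION & SPEC =====
def Spec_wrath (L : List Int) (out : Int) : Prop := out = wrath_alt L
instance (L : List Int) (out : Int) : Decidable (Spec_wrath L out) := by unfold Spec_wrath; infer_instance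

-- ===== CLAIM =====
def Claim_equal_wrath : Prop := ∀ (L : List Int), Dom_wrath L → Spec_wrath L (wrath L)

-- ===== LEMMAS AND PROOFS =====

-- reach[k] = k - L[k]
def pvReach (L : List Int) : List Int :=
  (List.range L.length).map (fun (k : Nat) => (k : Int) - L.getD k 0)

-- suffix minimum of reach from k on, seeded with n
def pvSuff (L : List Int) (k : Nat) : Int :=
  ((pvReach L).drop k).foldr min (L.length : Int)

-- A's loop, unrolled by index (processes indices k-1, …, 0 starting from dp = d)
def pvCnt (L : List Int) : Nat → Int → Int
  | 0, _ => 0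
  | k+1, d => (if (k : Int) < d then 1 else 0) + pvCnt L k (min d ((k : Int) - L.getD k 0))

-- B's per-element diff-array update
def pvStep (D : List Int) (p : Int × Int) : List Int :=
  if max 0 (p.1 - p.2) < p.1 then
    PySem.List.pySetD
      (PySem.List.pySetD D (max 0 (p.1 - p.2)) (PySem.List.pyGetD D (max 0 (p.1 - p.2)) 0 + 1))
      p.1
      (PySem.List.pyGetD
        (PySem.List.pySetD D (max 0 (p.1 - p.2)) (PySem.List.pyGetD D (max 0 (p.1 - p.2)) 0 + 1))
        p.1 0 - 1)
  else D

-- "the pair p = (j, x) kills index i"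
def pvCov (i : Nat) (p : Int × Int) : Bool := decide (max 0 (p.1 - p.2) ≤ (i : Int) ∧ (i : Int) < p.1)

theorem pvReach_length (L : List Int) : (pvReach L).length = L.length := by
  simp [pvReach]

theorem pvSuff_len (L : List Int) : pvSuff L L.length = (L.length : Int) := by
  simp [pvSuff, List.drop_eq_nil_of_le (le_of_eq (pvReach_length L))]

theorem pvSuff_succ (L : List Int) (k : Nat) (hk : k < L.length) :
    pvSuff L k = min ((k : Int) - L.getD k 0) (pvSuff L (k+1)) := by
  have hk' : k < (pvReach L).length := by rw [pvReach_length]; exact hk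
  rw [pvSuff, List.drop_eq_getElem_cons hk', List.foldr_cons]
  simp [pvReach, pvSuff, List.getElem_map, List.getElem_range]

theorem wrath_loop (L : List Int) (k : Nat) (a d : Int) :
    ((PySem.List.pyRange ((k : Int) - 1) (-1) (-1)).foldl
      (fun (s : Int × Int) i =>
        (if i < s.2 then s.1 + 1 else s.1, min s.2 (i - PySem.List.pyGetD L i 0)))
      (a, d)).1 = a + pvCnt L k d := by
  induction k generalizing a d with
  | zero =>
    rw [show ((0:Nat) : Int) - 1 = (-1 : Int) by norm_num,
      PySem.List.pyRange_neg_one_eq_nil le_rfl]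
    simp [pvCnt]
  | succ k ih =>
    have h1 : ((k : Int) + 1) - 1 = (k : Int) := by ring
    have h2 : (-1 : Int) < (k : Int) := by omega
    rw [show ((k+1 : Nat) : Int) = (k : Int) + 1 by push_cast; ring, h1,
      PySem.List.pyRange_neg_one_cons h2, List.foldl_cons]
    rw [ih]
    simp only [PySem.List.pyGetD_natCast, pvCnt]
    split_ifs <;> ring

theorem pvCnt_suff (L : List Int) (k : Nat) (hk : k ≤ L.length) :
    pvCnt L k (pvSuff L k)
      = (((List.range k).filter (fun (i : Nat) => decide ((i : Int) < pvSuff L (i+1)))).length : Int) := by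
  induction k with
  | zero => simp [pvCnt]
  | succ k ih =>
    have hk' : k < L.length := hk
    have hmin : min (pvSuff L (k+1)) ((k : Int) - L.getD k 0) = pvSuff L k := by
      rw [pvSuff_succ L k hk', min_comm]
    rw [pvCnt, hmin, ih (le_of_lt hk'), List.range_succ, List.filter_append]
    simp only [List.filter_cons, List.filter_nil, List.length_append]
    by_cases h : (k : Int) < pvSuff L (k+1)
    · simp [h]; ring
    · simp [h]

-- characterisation of "strictly below the suffix minimum"
theorem lt_foldr_min (x d : Int) (l : List Int) :
    x < l.foldr min d ↔ (x < d ∧ ∀ y ∈ l, x < y) := by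
  induction l with
  | nil => simp
  | cons y t ih => simp [ih]; tauto

theorem lt_pvSuff_iff (L : List Int) (x : Int) (k : Nat) :
    x < pvSuff L k
      ↔ (x < (L.length : Int) ∧ ∀ j : Nat, k ≤ j → j < L.length → x < (j : Int) - L.getD j 0) := by
  rw [pvSuff, lt_foldr_min]
  constructor
  · rintro ⟨h1, h2⟩
    refine ⟨h1, fun j hkj hj => ?_⟩
    apply h2
    rw [List.mem_drop_iff_getElem]
    refine ⟨j - k, by rw [pvReach_length]; omega, ?_⟩
    simp [pvReach, List.getElem_map, List.getElem_range, show k + (j - k) = j by omega]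
  · rintro ⟨h1, h2⟩
    refine ⟨h1, fun y hy => ?_⟩
    rw [List.mem_drop_iff_getElem] at hy
    obtain ⟨m, hm, rfl⟩ := hy
    rw [pvReach_length] at hm
    have : (pvReach L)[k + m]'(by rw [pvReach_length]; omega)
        = ((k + m : Nat) : Int) - L.getD (k + m) 0 := by
      simp [pvReach, List.getElem_map, List.getElem_range]
    rw [this]
    exact h2 (k + m) (by omega) (by omega)

-- prefix sums through a single diff-array update
theorem take_sum_set (D : List Int) (p i : Nat) (v : Int) (hp : p < D.length) :
    ((D.set p (D.getD p 0 + v)).take (i+1)).sum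
      = (D.take (i+1)).sum + (if p ≤ i then v else 0) := by
  induction D generalizing p i with
  | nil => simp at hp
  | cons d t ih =>
    cases p with
    | zero => simp [List.set_cons_zero]; ring
    | succ p =>
      cases i with
      | zero => simp [List.set_cons_succ]
      | succ i =>
        have hp' : p < t.length := by simpa using hp
        simp only [List.set_cons_succ, List.take_succ_cons, List.sum_cons, List.getD_cons_succ,
          ih p i hp', Nat.succ_le_succ_iff]
        ring

theorem pvStep_length (D : List Int) (p : Int × Int) : (pvStep D p).length = D.length := by
  unfold pvStep
  split <;> simp [PySem.List.length_pySetD]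


-- prefix sums of the folded diff array count the covering pairs
theorem diff_fold (ps : List (Int × Int)) (D : List Int) (i : Nat)
    (h : ∀ p ∈ ps, 0 ≤ p.1 ∧ p.1 < (D.length : Int)) :
    ((ps.foldl pvStep D).take (i+1)).sum
      = (D.take (i+1)).sum + ((ps.filter (pvCov i)).length : Int) := by
  induction ps generalizing D with
  | nil => simp
  | cons p t ih =>
    obtain ⟨hp0, hp1⟩ := h p (List.mem_cons_self ..)
    rw [List.foldl_cons]
    rw [ih (pvStep D p) (fun q hq => by
      rw [pvStep_length]; exact h q (List.mem_cons_of_mem _ hq))]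
    have hstep : ((pvStep D p).take (i+1)).sum
        = (D.take (i+1)).sum + (if pvCov i p = true then 1 else 0) := by
      unfold pvStep
      by_cases hlt : max 0 (p.1 - p.2) < p.1
      · rw [if_pos hlt]
        have hlo0 : (0:Int) ≤ max 0 (p.1 - p.2) := le_max_left _ _
        have hloN : (max 0 (p.1 - p.2)).toNat < D.length := by omega
        have hjN : p.1.toNat < D.length := by omega
        rw [PySem.List.pySetD_of_nonneg D _ hlo0,
          PySem.List.pyGetD_eq_getElem D 0 hlo0 (by omega),
          ← List.getD_eq_getElem D 0 hloN]
        rw [PySem.List.pySetD_of_nonneg _ _ hp0,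
          PySem.List.pyGetD_eq_getElem _ 0 hp0 (by rw [List.length_set]; omega),
          ← List.getD_eq_getElem _ 0 (by rw [List.length_set]; omega)]
        rw [show ∀ (M : List Int) (q : Nat), M.set q (M.getD q 0 - 1) = M.set q (M.getD q 0 + (-1))
          from fun M q => by ring_nf]
        rw [take_sum_set _ p.1.toNat i (-1) (by rw [List.length_set]; omega)]
        rw [take_sum_set D _ i 1 hloN]
        have hloi : ((max 0 (p.1 - p.2)).toNat ≤ i) ↔ (max 0 (p.1 - p.2) ≤ (i:Int)) := by omega
        have hji : (p.1.toNat ≤ i) ↔ (p.1 ≤ (i:Int)) := by omega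
        simp only [pvCov]
        by_cases hc : max 0 (p.1 - p.2) ≤ (i:Int) ∧ (i:Int) < p.1
        · rw [if_pos (hloi.mpr hc.1), if_neg (fun hcon => by have := hji.mp hcon; omega),
            if_pos (by simp [hc])]
          ring
        · push_neg at hc
          by_cases hlo_i : max 0 (p.1 - p.2) ≤ (i:Int)
          · have hji' : p.1 ≤ (i:Int) := hc hlo_i
            rw [if_pos (hloi.mpr hlo_i), if_pos (hji.mpr hji'),
              if_neg (by simp; omega)]
            ring
          · rw [if_neg (fun hcon => hlo_i (hloi.mp hcon)),
              if_neg (fun hcon => by have := hji.mp hcon; omega),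
              if_neg (by simp; omega)]
            ring
      · rw [if_neg hlt]
        have hcf : pvCov i p = false := by
          simp only [pvCov, decide_eq_false_iff_not]
          omega
        rw [hcf]
        simp
    rw [hstep, List.filter_cons]
    by_cases hc : pvCov i p = true
    · simp [hc]
      push_cast
      ring
    · simp [hc]

-- the forward sweep counts positions with zero running sum
theorem loopB (l : List Int) (a c : Int) :
    (l.foldl (fun (s : Int × Int) d =>
        (if s.2 + d = 0 then s.1 + 1 else s.1, s.2 + d)) (a, c)).1
      = a + (((List.range l.length).filter
          (fun i => decide (c + ((l.take (i+1)).sum) = 0))).length : Int) := by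
  induction l generalizing a c with
  | nil => simp
  | cons d t ih =>
    rw [List.foldl_cons, ih, List.length_cons, List.range_succ_eq_map, List.filter_cons]
    have htail : (((List.range t.length).map Nat.succ).filter
        (fun i => decide (c + (((d :: t).take (i+1)).sum) = 0)))
        = ((List.range t.length).filter
            (fun i => decide ((c + d) + ((t.take (i+1)).sum) = 0))).map Nat.succ := by
      rw [List.filter_map]
      congr 1
      apply List.filter_congr
      intro i _
      simp [Function.comp, List.take_succ_cons]
      constructor <;> intro <;> omega
    rw [htail]
    by_cases h0 : c + d = 0
    · rw [if_pos h0, if_pos (by simp [h0])]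
      simp only [List.length_cons, List.length_map]
      push_cast
      ring
    · rw [if_neg h0, if_neg (by simp [h0])]
      simp only [List.length_map]

theorem replicate_take_sum (n i : Nat) : (((List.replicate n (0:Int)).take i).sum) = 0 := by
  simp [List.take_replicate]

-- the filtered enumerate count, re-indexed over range
theorem enum_cov_count (L : List Int) (i : Nat) :
    (((PySem.List.enumerate L).filter (pvCov i)).length : Int)
      = (((List.range L.length).filter
          (fun (j : Nat) => decide ((j:Int) - L.getD j 0 ≤ (i:Int) ∧ (i:Int) < (j:Int)))).length : Int) := by
  rw [PySem.List.enumerate_eq_map_pyRange L 0, PySem.List.len_eq, PySem.List.pyRange_zero_nat,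
    List.map_map, List.filter_map, List.length_map]
  congr 2
  apply List.filter_congr
  intro j _
  simp only [Function.comp, pvCov, PySem.List.pyGetD_natCast]
  rw [decide_eq_decide]
  omega

-- every index produced by enumerate is in [0, n)
theorem enum_bounds (L : List Int) :
    ∀ p ∈ PySem.List.enumerate L, 0 ≤ p.1 ∧ p.1 < ((L.length + 1 : Nat) : Int) := by
  intro p hp
  rw [PySem.List.mem_enumerate_iff] at hp
  obtain ⟨k, hk, rfl⟩ := hp
  simp
  omega

theorem foldl_pvStep_length (ps : List (Int × Int)) (D : List Int) :
    (ps.foldl pvStep D).length = D.length := by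
  induction ps generalizing D with
  | nil => rfl
  | cons p t ih => rw [List.foldl_cons, ih, pvStep_length]

-- the two survivor predicates agree on every index below n
theorem pred_iff (L : List Int) (i : Nat) (hi : i < L.length) :
    ((i : Int) < pvSuff L (i+1))
      ↔ (((List.range L.length).filter
          (fun (j : Nat) => decide ((j:Int) - L.getD j 0 ≤ (i:Int) ∧ (i:Int) < (j:Int)))).length = 0) := by
  rw [lt_pvSuff_iff, List.length_eq_zero_iff, List.filter_eq_nil_iff]
  constructor
  · rintro ⟨-, h⟩ j hj hdec
    rw [List.mem_range] at hj
    rw [decide_eq_true_iff] at hdec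
    have hij : i + 1 ≤ j := by
      have : (i : Int) < (j : Int) := hdec.2
      omega
    have := h j hij hj
    omega
  · intro h
    refine ⟨by exact_mod_cast hi, fun j h1 h2 => ?_⟩
    have hd := h j (List.mem_range.mpr h2)
    simp only [decide_eq_true_iff] at hd
    have hij : (i : Int) < (j : Int) := by omega
    omega

-- ===== VERDICT =====
theorem wrath_spec : Claim_equal_wrath := by
  intro L _
  show wrath L = wrath_alt L
  set n := L.length with hn
  have hA : wrath L = pvCnt L n ((n : Int)) := by
    show ((PySem.List.pyRange (((n : Int)) - 1) (-1) (-1)).foldl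
      (fun (s : Int × Int) i =>
        (if i < s.2 then s.1 + 1 else s.1, min s.2 (i - PySem.List.pyGetD L i 0)))
      (0, (n : Int))).1 = _
    rw [wrath_loop L n 0 (n : Int), zero_add]
  have hC := pvCnt_suff L n le_rfl
  rw [pvSuff_len] at hC
  -- B side
  have hB0 : wrath_alt L =
      ((PySem.List.slice ((PySem.List.enumerate L).foldl pvStep (List.replicate (n+1) 0))
          none (some ((n : Nat) : Int))).foldl
        (fun (s : Int × Int) d => (if s.2 + d = 0 then s.1 + 1 else s.1, s.2 + d)) (0, 0)).1 := rfl
  have hdlen : ((PySem.List.enumerate L).foldl pvStep (List.replicate (n+1) 0)).length = n + 1 := by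
    rw [foldl_pvStep_length, List.length_replicate]
  set diff := (PySem.List.enumerate L).foldl pvStep (List.replicate (n+1) 0) with hdiff
  rw [hB0, PySem.List.slice_to_natCast, loopB, zero_add]
  have hlen2 : (diff.take n).length = n := by
    rw [List.length_take, hdlen]; omega
  rw [hlen2]
  rw [hA, hC]
  congr 1
  congr 1
  apply List.filter_congr
  intro i hi
  rw [List.mem_range] at hi
  have htt : (diff.take n).take (i+1) = diff.take (i+1) := by
    rw [List.take_take]; congr 1; omega
  have hsum : (diff.take (i+1)).sum
      = (((PySem.List.enumerate L).filter (pvCov i)).length : Int) := by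
    rw [hdiff, diff_fold _ _ _ (by
      intro p hp
      have := enum_bounds L p hp
      rw [List.length_replicate]
      exact this), replicate_take_sum, zero_add]
  rw [htt, hsum, zero_add]
  have := pred_iff L i hi
  have henum := enum_cov_count L i
  by_cases hp : (i : Int) < pvSuff L (i+1)
  · rw [decide_eq_true hp]
    have h0 : (((List.range n).filter
        (fun (j : Nat) => decide ((j:Int) - L.getD j 0 ≤ (i:Int) ∧ (i:Int) < (j:Int)))).length = 0) := this.mp hp
    have : (((PySem.List.enumerate L).filter (pvCov i)).length : Int) = 0 := by
      rw [henum]; exact_mod_cast h0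
    rw [this]
    simp
  · rw [decide_eq_false hp]
    have h0 : ¬ (((List.range n).filter
        (fun (j : Nat) => decide ((j:Int) - L.getD j 0 ≤ (i:Int) ∧ (i:Int) < (j:Int)))).length = 0) :=
      fun hc => hp (this.mpr hc)
    have : ¬ ((((PySem.List.enumerate L).filter (pvCov i)).length : Int) = 0) := by
      rw [henum]; exact_mod_cast fun hc => h0 (by exact_mod_cast hc)
    symm
    rw [decide_eq_false this]
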